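-- pv_equiv track=rewrite | github.com/EUD-curso-python/funciones_y_clases-ingDiegoatorres | funciones_y_clases.py | contar_valles
-- ===== SOURCE A (Python) =====
-- def contar_valles(pasos):
--     '''Contar el número de valles
--
--     Esta función debe recibir como argumento una lista de -1's, 0's y 1's, y lo
--     que representan son las subidas y las bajadas en una ruta de caminata. -1
--     representa un paso hacia abajo, el 0 representa un paso hacia adelante y el
--     1 representa un paso hacia arriba, entonces por ejemplo, para la lista
--     [-1,1,0,1,1,-1,0,0,1,-1,1,1,-1,-1] representa la siguiente ruta:
--
--                 /\
--          /\__/\/  \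
--        _/
--      \/
--
--     El objetivo de esta función es devolver el número de valles que estén
--     representados en la lista, que para el ejemplo que se acaba de mostrar es
--     de 3 valles.
--     '''
--     valles = 0
--     bajando = False
--     for i in pasos:
--       if (i == -1):
--         bajando = True
--       if (i == 1):
--         if bajando:
--           valles += 1
--         bajando = False
--     return valles;
-- ===== SOURCE B (Python) =====
-- def contar_valles(pasos):
--     # Two-phase: drop the no-op steps (anything that is not -1 or 1),
--     # then count adjacent pairs of a -1 step immediately followed by a 1 step in the filtered sequence.
--     fil = [x for x in pasos if x == -1 or x == 1]
--     return sum(1 for a, b in zip(fil, fil[1:]) if a == -1 and b == 1)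
-- ===== Notes on version B (the rewrite author's own statement) =====
-- stated objective: alternative
-- what changed: Replaces A's single-pass boolean state machine (the 'bajando' flag) with a stateless two-phase pipeline: filter out no-op steps, then count adjacent pairs of a -1 step immediately followed by a 1 step with zip.
import Mathlib
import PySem

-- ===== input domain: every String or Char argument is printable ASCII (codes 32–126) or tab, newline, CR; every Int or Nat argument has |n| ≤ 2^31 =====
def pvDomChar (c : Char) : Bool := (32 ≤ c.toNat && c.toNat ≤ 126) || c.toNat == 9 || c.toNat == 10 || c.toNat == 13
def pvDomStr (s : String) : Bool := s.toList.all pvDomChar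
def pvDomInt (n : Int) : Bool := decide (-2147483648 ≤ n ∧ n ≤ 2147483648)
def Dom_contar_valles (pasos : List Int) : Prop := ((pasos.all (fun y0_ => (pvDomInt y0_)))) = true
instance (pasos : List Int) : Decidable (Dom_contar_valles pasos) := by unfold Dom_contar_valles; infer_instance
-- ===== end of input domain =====

-- B replaces A's single-pass boolean state machine with a stateless two-phase
-- pipeline (filter out no-op steps, then count adjacent pairs of a -1 step immediately followed by a 1 step); same cost.


-- ===== PORT A =====
-- state machine: fold over the steps keeping (valles, bajando)
def contar_valles (pasos : List Int) : Int :=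
  (pasos.foldl
    (fun (st : Int × Bool) i =>
      let st1 : Int × Bool := if i = -1 then (st.1, true) else st
      if i = 1 then (if st1.2 then (st1.1 + 1, false) else (st1.1, false)) else st1)
    (0, false)).1

-- ===== PORT B =====
-- filter to the meaningful steps, then count adjacent pairs of a -1 step immediately followed by a 1 step via zip
def contar_valles_alt (pasos : List Int) : Int :=
  let fil := pasos.filter (fun x => x = -1 || x = 1)
  ((fil.zip (fil.drop 1)).filter (fun p => p.1 = -1 && p.2 = 1)).length

-- ===== PRECONDITION & SPEC =====
def Spec_contar_valles (pasos : List Int) (out : Int) : Prop := out = contar_valles_alt pasos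
instance (pasos : List Int) (out : Int) : Decidable (Spec_contar_valles pasos out) := by unfold Spec_contar_valles; infer_instance

-- ===== CLAIM (what is proved, stated in full; the proofs are below) =====
def Claim_equal_contar_valles : Prop := ∀ (pasos : List Int), Dom_contar_valles pasos → Spec_contar_valles pasos (contar_valles pasos)

-- ===== LEMMAS AND PROOFS =====

-- adjacent-pair valley count, recursive form
def pvPC : List Int → Int
  | x :: y :: t => (if x = -1 ∧ y = 1 then 1 else 0) + pvPC (y :: t)
  | _ => 0

-- the zip/filter/length computation of B equals the recursive pair count
lemma pvPC_zip (l : List Int) :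
    (((l.zip (l.drop 1)).filter (fun p => p.1 = -1 && p.2 = 1)).length : Int) = pvPC l := by
  induction l with
  | nil => simp [pvPC]
  | cons x t ih =>
    cases t with
    | nil => simp [pvPC]
    | cons y t' =>
      simp only [List.drop, List.zip_cons_cons, List.filter, pvPC]
      by_cases h : x = -1 ∧ y = 1
      · simp only [List.drop] at ih
        simp [h] at ih ⊢
        linarith [ih]
      · have : ((decide (x = -1) && decide (y = 1)) = false) := by
          simp only [Bool.and_eq_false_iff, decide_eq_false_iff_not]; tauto
        simp [this, h, ← ih]

lemma pvPC_one_cons (l : List Int) : pvPC (1 :: l) = pvPC l := by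
  cases l with
  | nil => simp [pvPC]
  | cons y t => simp [pvPC]

lemma pvPC_neg_neg (l : List Int) : pvPC (-1 :: -1 :: l) = pvPC (-1 :: l) := by
  simp [pvPC]

-- valley count of A's machine as a function of the current flag
def pvG : Bool → List Int → Int
  | _, [] => 0
  | b, x :: t =>
    if x = -1 then pvG true t
    else if x = 1 then (if b then 1 else 0) + pvG false t
    else pvG b t

-- A's fold, from any state, adds pvG of the remaining steps
lemma foldA_eq_pvG (l : List Int) : ∀ (v : Int) (b : Bool),
    (l.foldl
      (fun (st : Int × Bool) i =>
        let st1 : Int × Bool := if i = -1 then (st.1, true) else st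
        if i = 1 then (if st1.2 then (st1.1 + 1, false) else (st1.1, false)) else st1)
      (v, b)).1 = v + pvG b l := by
  induction l with
  | nil => intro v b; simp [pvG]
  | cons x t ih =>
    intro v b
    by_cases h1 : x = -1
    · simp [List.foldl, h1, pvG, ih]
      try omega
    · by_cases h2 : x = 1
      · cases b
        · simp [List.foldl, h2, pvG, ih]
          try omega
        · simp [List.foldl, h2, pvG, ih]
          try omega
      · simp [List.foldl, h2, pvG, ih]
        simp [h1]

-- pvG with flag b equals the pair count of the filtered list, prefixed by -1 iff the flag is set
lemma pvG_eq_pvPC (l : List Int) : ∀ (b : Bool),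
    pvG b l = pvPC ((if b then [-1] else []) ++ l.filter (fun x => x = -1 || x = 1)) := by
  induction l with
  | nil => intro b; cases b <;> simp [pvG, pvPC]
  | cons x t ih =>
    intro b
    by_cases h1 : x = -1
    · subst h1
      have := ih true
      simp only [pvG, List.filter] at *
      cases b <;> simpa [pvPC_neg_neg] using this
    · by_cases h2 : x = 1
      · subst h2
        have := ih false
        simp only [pvG, if_neg h1, List.filter] at *
        cases b
        · simpa [pvPC_one_cons] using this
        · simp only [this]
          simp [pvPC, pvPC_one_cons]
      · have hf : ((decide (x = -1) || decide (x = 1)) = false) := by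
          simp only [Bool.or_eq_false_iff, decide_eq_false_iff_not]; tauto
        simp [pvG, h1, h2, List.filter, ih b]

-- ===== VERDICT (by name: the statement is the Claim_ definition above) =====
theorem contar_valles_spec : Claim_equal_contar_valles := by
  intro pasos _
  show contar_valles pasos = contar_valles_alt pasos
  unfold contar_valles contar_valles_alt
  rw [foldA_eq_pvG, pvG_eq_pvPC, pvPC_zip]
  simp
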